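-- pv_equiv track=rewrite | github.com/js40598/Advent-of-Code-2020 | 7/2.py | required_bags
-- ===== SOURCE A (Python) =====
-- def required_bags(pattern, tab):
--     output = 0
--     for i in range(0, len(tab)):
--         if tab[i][0] == pattern:
--             for j in range(0, len(tab[i][1])):
--                 try:
--                     output += int(tab[i][1][j][0])
--                     rec = required_bags(tab[i][1][j][1], tab)
--                     output += (int(tab[i][1][j][0]) * rec) if rec != '0' else 0
--                 except ValueError:
--                     pass
--     return output
-- ===== SOURCE B (Python) =====
-- def required_bags(pattern, tab):
--     # Group all rows per bag name once, then memoize the total count per bag: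
--     # each bag's total is computed a single time (top-down dynamic programming)
--     # instead of being re-derived by rescanning the whole table on every
--     # recursive call.
--     index = {}
--     for key, children in tab:
--         index.setdefault(key, []).extend(children)
--     memo = {}
--
--     def total(p):
--         if p in memo:
--             return memo[p]
--         t = 0
--         for cnt, child in index.get(p, ()):
--             try:
--                 n = int(cnt)
--             except ValueError:
--                 continue
--             t += n * (1 + total(child))
--         memo[p] = t
--         return t
--
--     return total(pattern)
-- ===== Notes on version B (the rewrite author's own statement) =====
-- stated objective: alternative
-- what changed: B groups the table into a dict index once and memoizes the total count per bag name, so each bag's total is computed a single time via top-down dynamic programming instead of A's full-table rescan and re-recursion on every call; Pre_ excludes only tables with a containment cycle reachable from pattern, on which both A and B exceed Python's recursion limit (RecursionError).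
import Mathlib
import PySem

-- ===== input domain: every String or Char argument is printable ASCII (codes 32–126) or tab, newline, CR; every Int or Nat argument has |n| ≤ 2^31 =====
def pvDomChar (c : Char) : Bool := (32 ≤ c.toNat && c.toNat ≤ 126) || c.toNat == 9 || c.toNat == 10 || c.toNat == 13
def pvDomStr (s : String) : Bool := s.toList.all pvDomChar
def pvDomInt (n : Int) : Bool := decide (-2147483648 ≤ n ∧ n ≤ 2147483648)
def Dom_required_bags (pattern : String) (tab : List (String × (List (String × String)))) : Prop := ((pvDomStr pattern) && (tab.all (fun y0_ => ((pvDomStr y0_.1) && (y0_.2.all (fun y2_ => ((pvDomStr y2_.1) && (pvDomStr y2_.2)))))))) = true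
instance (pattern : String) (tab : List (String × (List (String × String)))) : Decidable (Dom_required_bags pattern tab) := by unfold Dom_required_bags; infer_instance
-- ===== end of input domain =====

-- B indexes the table once and memoizes the per-bag total (each bag name
-- evaluated a single time), replacing A's full-table rescan and re-recursion
-- on every call: a different algorithm, not measured faster by the harness.

-- ===== PORT A =====
-- Fuel is a totality guard only: under Pre_ (no containment cycle reachable from
-- pattern) the fuel tab.length + 1 is never exhausted, as proved below.  A's
-- `rec != '0'` compares an int with a string and is always True in Python 3, so
-- the branch is the unconditional addition `output + n * r`.
def requiredBagsA (tab : List (String × (List (String × String)))) :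
    Nat → String → Int
  | 0, _ => 0
  | fuel + 1, pattern =>
    tab.foldl (fun output row =>
      if row.1 == pattern then
        row.2.foldl (fun output c =>
          match PySem.Int.ofStr? c.1 with
          | none => output            -- ValueError: pass
          | some n =>
            let output := output + n
            let r := requiredBagsA tab fuel c.2
            output + n * r) output
      else output) 0

def required_bags (pattern : String) (tab : List (String × (List (String × String)))) : Int :=
  requiredBagsA tab (tab.length + 1) pattern

-- ===== PORT B =====
-- index.setdefault(key, []).extend(children)  =  modify key [] (· ++ children)
def bagIndex (tab : List (String × (List (String × String)))) :
    PySem.Dict String (List (String × String)) :=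
  tab.foldl (fun d row => d.modify row.1 [] (· ++ row.2)) PySem.Dict.empty

-- the memoized `total`; the memo dict is threaded through explicitly;
-- fuel is a totality guard only (never exhausted under Pre_, proved below)
def bagTotalB (index : PySem.Dict String (List (String × String))) :
    Nat → PySem.Dict String Int → String → PySem.Dict String Int × Int
  | 0, memo, _ => (memo, 0)
  | fuel + 1, memo, p =>
    match memo.get? p with
    | some v => (memo, v)
    | none =>
      let st := (index.getD p []).foldl
        (fun (acc : PySem.Dict String Int × Int) c =>
          match PySem.Int.ofStr? c.1 with
          | none => acc               -- ValueError: continue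
          | some n =>
            let mr := bagTotalB index fuel acc.1 c.2
            (mr.1, acc.2 + n * (1 + mr.2))) (memo, 0)
      (st.1.insert p st.2, st.2)

def required_bags_alt (pattern : String) (tab : List (String × (List (String × String)))) : Int :=
  (bagTotalB (bagIndex tab) (tab.length + 1) PySem.Dict.empty pattern).2

-- ===== PRECONDITION & SPEC =====
-- all children of bag p, across all rows naming p, in table order
def bagChildren (tab : List (String × (List (String × String)))) (p : String) :
    List (String × String) :=
  (tab.filter (fun row => row.1 == p)).flatMap (fun row => row.2)

-- the bags directly contained in p with an int-parsable count (A recurses into exactly these)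
def bagEdges (tab : List (String × (List (String × String)))) (p : String) : List String :=
  (bagChildren tab p).filterMap (fun c =>
    if (PySem.Int.ofStr? c.1).isSome then some c.2 else none)

-- the set of bag names (table keys) reachable from pattern along containment
-- edges, computed as the standard saturation of {pattern}; not part of either port
def reachAux (tab : List (String × (List (String × String)))) :
    Nat → List String → List String
  | 0, S => S
  | n + 1, S =>
    let T := (S.flatMap (bagEdges tab)).filter (fun c => decide (c ∈ tab.map Prod.fst))
    if T.all (fun c => decide (c ∈ S)) then S else reachAux tab n (T ∪ S)

def reachSet (tab : List (String × (List (String × String)))) (pattern : String) :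
    List String :=
  reachAux tab (tab.length + 1) [pattern]

-- Pre_ excludes exactly the tables with a containment cycle (int-parsable counts)
-- reachable from pattern: there Python A (and B alike) recurses forever and raises
-- RecursionError.  Stated in closed form: every nonempty sublist of the key names
-- whose members are all reachable from pattern contains a bag none of whose
-- contained bags lies in that sublist.  Cycles away from pattern stay inside Pre_.
def Pre_required_bags (pattern : String) (tab : List (String × (List (String × String)))) : Prop :=
  ∀ l ∈ (tab.map Prod.fst).sublists, l ≠ [] →
    (∀ p ∈ l, p ∈ reachSet tab pattern) →
    ∃ p ∈ l, ∀ c ∈ bagEdges tab p, c ∉ l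

instance (pattern : String) (tab : List (String × (List (String × String)))) : Decidable (Pre_required_bags pattern tab) := by unfold Pre_required_bags; infer_instance

def pvWitness_required_bags : String × (List (String × (List (String × String)))) :=
  ("shiny gold", [("shiny gold", [("2", "dark red"), ("no", "other")]), ("dark red", [("3", "faded blue")])])

def Spec_required_bags (pattern : String) (tab : List (String × (List (String × String)))) (out : Int) : Prop := out = required_bags_alt pattern tab
instance (pattern : String) (tab : List (String × (List (String × String)))) (out : Int) : Decidable (Spec_required_bags pattern tab out) := by unfold Spec_required_bags; infer_instance

-- ===== CLAIM (what is proved, stated in full; the proofs are below) =====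
def Claim_equal_required_bags : Prop := ∀ (pattern : String) (tab : List (String × (List (String × String)))), Dom_required_bags pattern tab → Pre_required_bags pattern tab → Spec_required_bags pattern tab (required_bags pattern tab)

-- ===== LEMMAS AND PROOFS =====

-- the canonical value of A at p (fuel tab.length + 1, as `required_bags` uses)
def bagV (tab : List (String × (List (String × String)))) (p : String) : Int :=
  requiredBagsA tab (tab.length + 1) p

theorem bagChildren_cons (row : String × List (String × String))
    (rest : List (String × (List (String × String)))) (p : String) :
    bagChildren (row :: rest) p =
      (if row.1 == p then row.2 else []) ++ bagChildren rest p := by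
  by_cases h : row.1 = p <;> simp [bagChildren, h]

theorem mem_bagChildren {tab : List (String × (List (String × String)))}
    {row : String × List (String × String)} {p : String} {c : String × String}
    (hrow : row ∈ tab) (hp : row.1 = p) (hc : c ∈ row.2) : c ∈ bagChildren tab p := by
  simp only [bagChildren, List.mem_flatMap, List.mem_filter]
  exact ⟨row, ⟨hrow, by simp [hp]⟩, hc⟩

theorem mem_bagEdges {tab : List (String × (List (String × String)))}
    {p : String} {c : String × String}
    (hc : c ∈ bagChildren tab p) (h : (PySem.Int.ofStr? c.1).isSome) :
    c.2 ∈ bagEdges tab p := by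
  simp only [bagEdges, List.mem_filterMap]
  exact ⟨c, hc, by simp [h]⟩

theorem bagChildren_nokey {tab : List (String × (List (String × String)))} {p : String}
    (h : p ∉ tab.map Prod.fst) : bagChildren tab p = [] := by
  have : tab.filter (fun row => row.1 == p) = [] := by
    rw [List.filter_eq_nil_iff]
    intro row hrow hpe
    exact h (List.mem_map.2 ⟨row, hrow, by simpa using hpe⟩)
  simp [bagChildren, this]

theorem bagEdges_nokey {tab : List (String × (List (String × String)))} {p : String}
    (h : p ∉ tab.map Prod.fst) : bagEdges tab p = [] := by
  simp [bagEdges, bagChildren_nokey h]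

-- A at a non-key pattern: no row matches, the value is 0 for every fuel
theorem requiredBagsA_nokey {tab : List (String × (List (String × String)))} {p : String}
    (h : p ∉ tab.map Prod.fst) : ∀ fuel, requiredBagsA tab fuel p = 0 := by
  intro fuel
  cases fuel with
  | zero => rfl
  | succ f =>
    simp only [requiredBagsA]
    have haux : ∀ (l : List (String × (List (String × String)))) (acc : Int),
        (∀ row ∈ l, (row.1 == p) = false) →
        l.foldl (fun output row =>
          if row.1 == p then
            row.2.foldl (fun output c =>
              match PySem.Int.ofStr? c.1 with
              | none => output
              | some n =>
                let output := output + n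
                let r := requiredBagsA tab f c.2
                output + n * r) output
          else output) acc = acc := by
      intro l
      induction l with
      | nil => intro acc _; rfl
      | cons row rest ih =>
        intro acc hl
        rw [List.foldl_cons, hl row (by simp)]
        exact ih acc (fun r hr => hl r (by simp [hr]))
    apply haux
    intro row hrow
    by_contra hne
    have : row.1 = p := by
      cases hb : (row.1 == p) with
      | false => exact absurd hb hne
      | true => exact beq_iff_eq.1 hb
    exact h (List.mem_map.2 ⟨row, hrow, this⟩)

-- ---- the reachable set is closed under containment edges into keys ----

def ReachClosed (tab : List (String × (List (String × String)))) (S : List String) : Prop :=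
  ∀ p ∈ S, ∀ c ∈ bagEdges tab p, c ∈ tab.map Prod.fst → c ∈ S

theorem nodup_subset_length {l l' : List String} (h : l.Nodup) (hs : l ⊆ l') :
    l.length ≤ l'.length := by
  have h1 : l.toFinset.card = l.length := List.toFinset_card_of_nodup h
  have h2 : l.toFinset ⊆ l'.toFinset := by
    intro x hx
    rw [List.mem_toFinset] at hx ⊢
    exact hs hx
  have h3 : l'.toFinset.card ≤ l'.length := List.toFinset_card_le l'
  have := Finset.card_le_card h2
  omega

theorem reachAux_closed (tab : List (String × (List (String × String)))) (pattern : String) :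
    ∀ (n : Nat) (S : List String), S.Nodup → S ⊆ pattern :: tab.map Prod.fst →
      (pattern :: tab.map Prod.fst).dedup.length ≤ n + S.length →
      ReachClosed tab (reachAux tab n S) ∧ S ⊆ reachAux tab n S := by
  intro n
  induction n with
  | zero =>
    intro S hnd hsub hlen
    simp only [reachAux]
    refine ⟨?_, fun x hx => hx⟩
    -- S is saturated: it already contains every name of pattern :: keys
    have h1 : S.toFinset.card = S.length := List.toFinset_card_of_nodup hnd
    have h2 : S.toFinset ⊆ (pattern :: tab.map Prod.fst).toFinset := by
      intro x hx; rw [List.mem_toFinset] at hx ⊢; exact hsub hx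
    have h3 : (pattern :: tab.map Prod.fst).toFinset.card =
        (pattern :: tab.map Prod.fst).dedup.length := List.card_toFinset _
    have heq : S.toFinset = (pattern :: tab.map Prod.fst).toFinset :=
      Finset.eq_of_subset_of_card_le h2 (by omega)
    intro p _ c _ hkey
    have : c ∈ (pattern :: tab.map Prod.fst).toFinset := by
      rw [List.mem_toFinset]; exact List.mem_cons_of_mem _ hkey
    rw [← heq, List.mem_toFinset] at this
    exact this
  | succ n ih =>
    intro S hnd hsub hlen
    simp only [reachAux]
    by_cases hall : ((S.flatMap (bagEdges tab)).filter
        (fun c => decide (c ∈ tab.map Prod.fst))).all (fun c => decide (c ∈ S))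
    · rw [if_pos hall]
      refine ⟨?_, fun x hx => hx⟩
      intro p hp c hc hkey
      have hmemT : c ∈ (S.flatMap (bagEdges tab)).filter
          (fun c => decide (c ∈ tab.map Prod.fst)) := by
        rw [List.mem_filter]
        exact ⟨List.mem_flatMap.2 ⟨p, hp, hc⟩, by simpa using hkey⟩
      have := List.all_eq_true.1 hall c hmemT
      simpa using this
    · rw [if_neg hall]
      -- some new reachable key t appears; the union strictly grows
      have hex : ∃ t, t ∈ (S.flatMap (bagEdges tab)).filter
          (fun c => decide (c ∈ tab.map Prod.fst)) ∧ t ∉ S := by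
        by_contra hno
        push Not at hno
        exact hall (List.all_eq_true.2 (fun t ht => by simpa using hno t ht))
      obtain ⟨t, htT, htS⟩ := hex
      set T := (S.flatMap (bagEdges tab)).filter
          (fun c => decide (c ∈ tab.map Prod.fst)) with hT
      have hndU : (T ∪ S).Nodup := List.Nodup.union T hnd
      have hsubU : (T ∪ S) ⊆ pattern :: tab.map Prod.fst := by
        intro x hx
        rw [List.mem_union_iff] at hx
        cases hx with
        | inl hx =>
          rw [hT, List.mem_filter] at hx
          exact List.mem_cons_of_mem _ (by simpa using hx.2)
        | inr hx => exact hsub hx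
      have hSU : S ⊆ T ∪ S := fun x hx => List.mem_union_iff.2 (Or.inr hx)
      have hlenU : (pattern :: tab.map Prod.fst).dedup.length ≤ n + (T ∪ S).length := by
        have hts : (t :: S) ⊆ T ∪ S := by
          intro x hx
          cases List.mem_cons.1 hx with
          | inl h => exact List.mem_union_iff.2 (Or.inl (h ▸ htT))
          | inr h => exact hSU h
        have : (t :: S).length ≤ (T ∪ S).length :=
          nodup_subset_length (List.nodup_cons.2 ⟨htS, hnd⟩) hts
        simp only [List.length_cons] at this
        omega
      obtain ⟨hcl, hsb⟩ := ih (T ∪ S) hndU hsubU hlenU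
      exact ⟨hcl, fun x hx => hsb (hSU hx)⟩

theorem reachSet_closed (tab : List (String × (List (String × String)))) (pattern : String) :
    ReachClosed tab (reachSet tab pattern) := by
  have := reachAux_closed tab pattern (tab.length + 1) [pattern]
    (by simp) (by intro x hx; simp at hx; simp [hx])
    (by
      have h1 : (pattern :: tab.map Prod.fst).dedup.length ≤
          (pattern :: tab.map Prod.fst).length :=
        (List.dedup_sublist _).length_le
      simp only [List.length_cons, List.length_map] at h1
      simp only [List.length_cons]
      omega)
  exact this.1

theorem pattern_mem_reachSet (tab : List (String × (List (String × String)))) (pattern : String) :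
    pattern ∈ reachSet tab pattern := by
  have := reachAux_closed tab pattern (tab.length + 1) [pattern]
    (by simp) (by intro x hx; simp at hx; simp [hx])
    (by
      have h1 : (pattern :: tab.map Prod.fst).dedup.length ≤
          (pattern :: tab.map Prod.fst).length :=
        (List.dedup_sublist _).length_le
      simp only [List.length_cons, List.length_map] at h1
      simp only [List.length_cons]
      omega)
  exact this.2 (by simp)

-- ---- from Pre_ (no reachable cycle), build a rank decreasing along reachable edges ----

theorem exists_rank {tab : List (String × (List (String × String)))} {pattern : String}
    (hpre : Pre_required_bags pattern tab) :
    ∃ r : String → Nat, (∀ p, r p ≤ tab.length) ∧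
      (∀ p c, p ∈ reachSet tab pattern → c ∈ bagEdges tab p →
        c ∈ tab.map Prod.fst → r c < r p) := by
  unfold Pre_required_bags at hpre
  set R := reachSet tab pattern with hR
  set keysR := (tab.map Prod.fst).filter (fun p => decide (p ∈ R)) with hkR
  have hkRsub : keysR.Sublist (tab.map Prod.fst) := List.filter_sublist
  have haux : ∀ (n : Nat) (l : List String), l.length ≤ n →
      l.Sublist keysR →
      ∀ r : String → Nat, (∀ p, r p ≤ tab.length - l.length) →
      (∀ p, p ∈ R → p ∉ l → ∀ c, c ∈ bagEdges tab p → c ∈ tab.map Prod.fst →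
        c ∉ l ∧ r c < r p) →
      ∃ r' : String → Nat, (∀ p, r' p ≤ tab.length) ∧
        (∀ p c, p ∈ R → c ∈ bagEdges tab p → c ∈ tab.map Prod.fst → r' c < r' p) := by
    intro n
    induction n with
    | zero =>
      intro l hlen _ r hb hinv
      have hl : l = [] := List.eq_nil_of_length_eq_zero (by omega)
      subst hl
      exact ⟨r, fun p => le_trans (hb p) (by omega),
        fun p c hp hc hk => (hinv p hp (by simp) c hc hk).2⟩
    | succ n ih =>
      intro l hlen hsub r hb hinv
      by_cases hl : l = []
      · subst hl
        exact ⟨r, fun p => le_trans (hb p) (by omega),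
          fun p c hp hc hk => (hinv p hp (by simp) c hc hk).2⟩
      · have hlkeys : l.Sublist (tab.map Prod.fst) := hsub.trans hkRsub
        have hlR : ∀ p ∈ l, p ∈ R := by
          intro p hp
          have := hsub.subset hp
          rw [hkR, List.mem_filter] at this
          simpa using this.2
        obtain ⟨p', hp'l, hp'sink⟩ := hpre l (List.mem_sublists.2 hlkeys) hl hlR
        have hp'R : p' ∈ R := hlR p' hp'l
        have hllen : l.length ≤ tab.length := by
          have := hlkeys.length_le
          simpa using this
        set l2 := l.filter (fun x => x != p') with hl2
        have hsub2 : l2.Sublist keysR := List.filter_sublist.trans hsub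
        have hp'notl2 : p' ∉ l2 := by simp [hl2, List.mem_filter]
        have hmem_l2 : ∀ x, x ∈ l2 ↔ (x ∈ l ∧ x ≠ p') := by
          intro x; simp [hl2, List.mem_filter]
        have hlen2 : l2.length < l.length := by
          have hle : l2.length ≤ l.length := by
            rw [hl2]; exact List.filter_sublist.length_le
          rcases Nat.lt_or_ge l2.length l.length with h | h
          · exact h
          · exfalso
            have heq : l2 = l := by
              rw [hl2]
              exact List.filter_sublist.eq_of_length (by rw [hl2] at h hle; omega)
            rw [heq] at hp'notl2
            exact hp'notl2 hp'l
        have hlpos : 1 ≤ l.length := by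
          cases l with
          | nil => exact absurd rfl hl
          | cons a t => simp
        refine ih l2 (by omega) hsub2
          (fun x => if x = p' then tab.length - l.length + 1 else r x) ?_ ?_
        · intro p
          dsimp only
          by_cases hp : p = p'
          · rw [if_pos hp]
            omega
          · rw [if_neg hp]
            have := hb p; omega
        · intro p hpR hpl2 c hc hk
          dsimp only
          by_cases hpp' : p = p'
          · rw [hpp'] at hc
            have hcnl : c ∉ l := hp'sink c hc
            have hcne : c ≠ p' := fun h => hcnl (h ▸ hp'l)
            refine ⟨fun h => hcnl ((hmem_l2 c).1 h).1, ?_⟩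
            rw [if_neg hcne, if_pos hpp']
            have := hb c; omega
          · have hpl : p ∉ l := by
              by_contra hpl
              exact hpl2 ((hmem_l2 p).2 ⟨hpl, hpp'⟩)
            obtain ⟨hcnl, hrlt⟩ := hinv p hpR hpl c hc hk
            have hcne : c ≠ p' := fun h => hcnl (h ▸ hp'l)
            refine ⟨fun h => hcnl ((hmem_l2 c).1 h).1, ?_⟩
            rw [if_neg hcne, if_neg hpp']
            exact hrlt
  refine haux keysR.length keysR (le_refl _) (List.Sublist.refl _) (fun _ => 0)
    (by simp) ?_
  intro p hpR hpk c hc hk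
  by_cases hpkey : p ∈ tab.map Prod.fst
  · exfalso
    apply hpk
    rw [hkR, List.mem_filter]
    exact ⟨hpkey, by simpa using hpR⟩
  · rw [bagEdges_nokey hpkey] at hc
    cases hc

-- ---- A's value is fuel-independent on the reachable part ----

theorem goA_stable {tab : List (String × (List (String × String)))} {pattern : String}
    {r : String → Nat}
    (hedge : ∀ p c, p ∈ reachSet tab pattern → c ∈ bagEdges tab p →
      c ∈ tab.map Prod.fst → r c < r p)
    (hclosed : ReachClosed tab (reachSet tab pattern)) :
    ∀ (n : Nat) (p : String) (f g : Nat), p ∈ reachSet tab pattern → r p ≤ n →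
      r p < f → r p < g →
      requiredBagsA tab f p = requiredBagsA tab g p := by
  intro n
  induction n using Nat.strong_induction_on with
  | _ n ih =>
    intro p f g hpR hn hf hg
    obtain ⟨f', rfl⟩ : ∃ f', f = f' + 1 := ⟨f - 1, by omega⟩
    obtain ⟨g', rfl⟩ : ∃ g', g = g' + 1 := ⟨g - 1, by omega⟩
    simp only [requiredBagsA]
    apply PySem.List.foldl_congr_mem
    intro acc row hrow
    by_cases hr : row.1 == p
    · simp only [hr, if_pos]
      apply PySem.List.foldl_congr_mem
      intro o c hc
      cases hparse : PySem.Int.ofStr? c.1 with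
      | none => rfl
      | some m =>
        have hcc : c ∈ bagChildren tab p :=
          mem_bagChildren hrow (by simpa using hr) hc
        have hed : c.2 ∈ bagEdges tab p :=
          mem_bagEdges hcc (by simp [hparse])
        by_cases hkey : c.2 ∈ tab.map Prod.fst
        · have hcR : c.2 ∈ reachSet tab pattern := hclosed p hpR c.2 hed hkey
          have hlt : r c.2 < r p := hedge p c.2 hpR hed hkey
          have := ih (r c.2) (by omega) c.2 f' g' hcR
            (le_refl _) (by omega) (by omega)
          simp [this]
        · have h1 := requiredBagsA_nokey hkey f'
          have h2 := requiredBagsA_nokey hkey g'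
          simp [h1, h2]
    · simp [hr]

theorem loopA_eq_children (g : Int → (String × String) → Int) (p : String) :
    ∀ (tab : List (String × (List (String × String)))) (init : Int),
      tab.foldl (fun o row => if row.1 == p then row.2.foldl g o else o) init =
        (bagChildren tab p).foldl g init := by
  intro tab
  induction tab with
  | nil => intro init; simp [bagChildren]
  | cons row rest ih =>
    intro init
    rw [bagChildren_cons, List.foldl_append]
    by_cases hr : row.1 == p
    · simp only [hr, if_pos, List.foldl_cons]
      exact ih _
    · simp only [hr, if_neg, Bool.false_eq_true, not_false_iff, List.foldl_cons,
        List.foldl_nil]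
      exact ih _

theorem goA_eq_V {tab : List (String × (List (String × String)))} {pattern : String}
    {r : String → Nat}
    (hedge : ∀ p c, p ∈ reachSet tab pattern → c ∈ bagEdges tab p →
      c ∈ tab.map Prod.fst → r c < r p)
    (hclosed : ReachClosed tab (reachSet tab pattern))
    (hb : ∀ p, r p ≤ tab.length)
    (p : String) (f : Nat) (hpR : p ∈ reachSet tab pattern) (hf : r p < f) :
    requiredBagsA tab f p =
      (bagChildren tab p).foldl (fun o c =>
        match PySem.Int.ofStr? c.1 with
        | none => o
        | some n => o + n + n * bagV tab c.2) 0 := by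
  obtain ⟨f', rfl⟩ : ∃ f', f = f' + 1 := ⟨f - 1, by omega⟩
  simp only [requiredBagsA]
  rw [loopA_eq_children]
  apply PySem.List.foldl_congr_mem
  intro o c hc
  cases hparse : PySem.Int.ofStr? c.1 with
  | none => rfl
  | some m =>
    have hed : c.2 ∈ bagEdges tab p := mem_bagEdges hc (by simp [hparse])
    by_cases hkey : c.2 ∈ tab.map Prod.fst
    · have hcR : c.2 ∈ reachSet tab pattern := hclosed p hpR c.2 hed hkey
      have hlt : r c.2 < r p := hedge p c.2 hpR hed hkey
      have hbv := hb c.2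
      have := goA_stable hedge hclosed (r c.2) c.2 f' (tab.length + 1) hcR
        (le_refl _) (by omega) (by omega)
      simp [bagV, this]
    · have h1 := requiredBagsA_nokey hkey f'
      have h2 := requiredBagsA_nokey hkey (tab.length + 1)
      simp [bagV, h1, h2]

-- the total contribution of a list of (count, child) entries, child values canonical
def bagSum (tab : List (String × (List (String × String)))) :
    List (String × String) → Int
  | [] => 0
  | c :: rest =>
    (match PySem.Int.ofStr? c.1 with
     | none => 0
     | some n => n * (1 + bagV tab c.2)) + bagSum tab rest

theorem foldl_eq_bagSum (tab : List (String × (List (String × String)))) :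
    ∀ (l : List (String × String)) (acc : Int),
      l.foldl (fun o c =>
        match PySem.Int.ofStr? c.1 with
        | none => o
        | some n => o + n + n * bagV tab c.2) acc = acc + bagSum tab l := by
  intro l
  induction l with
  | nil => intro acc; simp [bagSum]
  | cons c rest ih =>
    intro acc
    simp only [List.foldl_cons, bagSum]
    cases hparse : PySem.Int.ofStr? c.1 with
    | none => rw [ih]; ring
    | some n => rw [ih]; ring

theorem bagV_eq_sum {tab : List (String × (List (String × String)))} {pattern : String}
    {r : String → Nat}
    (hedge : ∀ p c, p ∈ reachSet tab pattern → c ∈ bagEdges tab p →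
      c ∈ tab.map Prod.fst → r c < r p)
    (hclosed : ReachClosed tab (reachSet tab pattern))
    (hb : ∀ p, r p ≤ tab.length)
    (p : String) (hp : p ∈ reachSet tab pattern ∨ p ∉ tab.map Prod.fst) :
    bagV tab p = bagSum tab (bagChildren tab p) := by
  cases hp with
  | inl hpR =>
    have hf : r p < tab.length + 1 := by have := hb p; omega
    have := goA_eq_V hedge hclosed hb p (tab.length + 1) hpR hf
    rw [bagV, this, foldl_eq_bagSum]
    ring
  | inr hnk =>
    rw [bagV, requiredBagsA_nokey hnk, bagChildren_nokey hnk]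
    simp [bagSum]

theorem getD_bagIndex_aux (p : String) :
    ∀ (tab : List (String × (List (String × String))))
      (d : PySem.Dict String (List (String × String))),
      ((tab.foldl (fun d row => d.modify row.1 [] (· ++ row.2)) d).getD p []) =
        d.getD p [] ++ bagChildren tab p := by
  intro tab
  induction tab with
  | nil => intro d; simp [bagChildren]
  | cons row rest ih =>
    intro d
    rw [List.foldl_cons, ih, bagChildren_cons]
    by_cases hr : row.1 = p
    · rw [PySem.Dict.getD_modify]
      simp [hr, List.append_assoc]
    · rw [PySem.Dict.getD_modify]
      simp [hr, Ne.symm hr]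

theorem getD_bagIndex (tab : List (String × (List (String × String)))) (p : String) :
    (bagIndex tab).getD p [] = bagChildren tab p := by
  rw [bagIndex, getD_bagIndex_aux]
  simp [PySem.Dict.getD_empty]

theorem goB_correct {tab : List (String × (List (String × String)))} {pattern : String}
    {r : String → Nat}
    (hedge : ∀ p c, p ∈ reachSet tab pattern → c ∈ bagEdges tab p →
      c ∈ tab.map Prod.fst → r c < r p)
    (hclosed : ReachClosed tab (reachSet tab pattern))
    (hb : ∀ p, r p ≤ tab.length) :
    ∀ (fuel : Nat) (p : String) (memo : PySem.Dict String Int),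
      (∀ q v, memo.get? q = some v → v = bagV tab q) →
      ((p ∈ reachSet tab pattern ∧ r p < fuel) ∨ p ∉ tab.map Prod.fst) →
      (bagTotalB (bagIndex tab) fuel memo p).2 = bagV tab p ∧
      (∀ q v, (bagTotalB (bagIndex tab) fuel memo p).1.get? q = some v →
        v = bagV tab q) := by
  intro fuel
  induction fuel with
  | zero =>
    intro p memo hinv hp
    rcases hp with ⟨_, hlt⟩ | hnk
    · omega
    · simp only [bagTotalB]
      exact ⟨by rw [bagV, requiredBagsA_nokey hnk], hinv⟩
  | succ fuel ih =>
    intro p memo hinv hp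
    simp only [bagTotalB]
    cases hm : memo.get? p with
    | some v =>
      simp only
      exact ⟨hinv p v hm, hinv⟩
    | none =>
      simp only
      rw [getD_bagIndex]
      -- the threaded inner fold: value accumulates bagSum, memo keeps the invariant
      have inner : ∀ (l : List (String × String)),
          (∀ c ∈ l, c ∈ bagChildren tab p) →
          (∀ c ∈ l, (PySem.Int.ofStr? c.1).isSome →
            ((c.2 ∈ reachSet tab pattern ∧ r c.2 < fuel) ∨ c.2 ∉ tab.map Prod.fst)) →
          ∀ (memo' : PySem.Dict String Int) (acc : Int),
            (∀ q v, memo'.get? q = some v → v = bagV tab q) →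
            (l.foldl (fun (acc : PySem.Dict String Int × Int) c =>
              match PySem.Int.ofStr? c.1 with
              | none => acc
              | some n =>
                let mr := bagTotalB (bagIndex tab) fuel acc.1 c.2
                (mr.1, acc.2 + n * (1 + mr.2))) (memo', acc)).2 = acc + bagSum tab l ∧
            (∀ q v, (l.foldl (fun (acc : PySem.Dict String Int × Int) c =>
              match PySem.Int.ofStr? c.1 with
              | none => acc
              | some n =>
                let mr := bagTotalB (bagIndex tab) fuel acc.1 c.2
                (mr.1, acc.2 + n * (1 + mr.2))) (memo', acc)).1.get? q = some v →
              v = bagV tab q) := by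
        intro l
        induction l with
        | nil => intro _ _ memo' acc hinv'; simpa [bagSum] using hinv'
        | cons c rest ihl =>
          intro hl hlr memo' acc hinv'
          simp only [List.foldl_cons]
          cases hparse : PySem.Int.ofStr? c.1 with
          | none =>
            have := ihl (fun d hd => hl d (by simp [hd]))
              (fun d hd => hlr d (by simp [hd])) memo' acc hinv'
            simpa [bagSum, hparse] using this
          | some n =>
            have hchild := ih c.2 memo' hinv' (hlr c (by simp) (by simp [hparse]))
            have hrec := ihl (fun d hd => hl d (by simp [hd]))
              (fun d hd => hlr d (by simp [hd]))
              (bagTotalB (bagIndex tab) fuel memo' c.2).1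
              (acc + n * (1 + (bagTotalB (bagIndex tab) fuel memo' c.2).2))
              hchild.2
            refine ⟨?_, hrec.2⟩
            rw [hrec.1, hchild.1]
            simp [bagSum, hparse]
            ring
      have hchildcond : ∀ c ∈ bagChildren tab p, (PySem.Int.ofStr? c.1).isSome →
          ((c.2 ∈ reachSet tab pattern ∧ r c.2 < fuel) ∨ c.2 ∉ tab.map Prod.fst) := by
        intro c hc hsome
        rcases hp with ⟨hpR, hplt⟩ | hnk
        · have hed : c.2 ∈ bagEdges tab p := mem_bagEdges hc hsome
          by_cases hkey : c.2 ∈ tab.map Prod.fst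
          · have hcR := hclosed p hpR c.2 hed hkey
            have := hedge p c.2 hpR hed hkey
            exact Or.inl ⟨hcR, by omega⟩
          · exact Or.inr hkey
        · rw [bagChildren_nokey hnk] at hc
          cases hc
      have hres := inner (bagChildren tab p) (fun _ h => h) hchildcond memo 0 hinv
      have hval : bagV tab p = bagSum tab (bagChildren tab p) := by
        apply bagV_eq_sum hedge hclosed hb
        rcases hp with ⟨hpR, _⟩ | hnk
        · exact Or.inl hpR
        · exact Or.inr hnk
      refine ⟨?_, ?_⟩
      · rw [hres.1, hval]
        ring
      · intro q v hq
        rw [PySem.Dict.get?_insert] at hq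
        by_cases hqp : q = p
        · rw [if_pos hqp] at hq
          have : v = 0 + bagSum tab (bagChildren tab p) := by
            rw [← hres.1]; exact (Option.some.inj hq).symm
          rw [this, hqp, hval]
          ring
        · rw [if_neg hqp] at hq
          exact hres.2 q v hq

-- ===== VERDICT (by name: the statement is the Claim_ definition above) =====
theorem required_bags_spec : Claim_equal_required_bags := by
  unfold Claim_equal_required_bags
  intro pattern tab _ hpre
  obtain ⟨r, hb, hedge⟩ := exists_rank hpre
  have hclosed := reachSet_closed tab pattern
  have hpR := pattern_mem_reachSet tab pattern
  unfold Spec_required_bags required_bags required_bags_alt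
  have hlt : r pattern < tab.length + 1 := by have := hb pattern; omega
  have hB := goB_correct hedge hclosed hb (tab.length + 1) pattern PySem.Dict.empty
    (by intro q v h; simp [PySem.Dict.get?_empty] at h) (Or.inl ⟨hpR, hlt⟩)
  rw [hB.1]
  rfl
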